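-- pv_equiv track=rewrite | github.com/Gerbert5664/test35621 | monitor.py | calculate_orders
-- ===== SOURCE A (Python) =====
-- def calculate_orders(balance: int) -> list[int]:
--     """Calculate optimal order amounts based on balance."""
--     orders = []
--     remaining = balance
--     while remaining >= 100:
--         orders.append(100)
--         remaining -= 100
--     if remaining >= 30:
--         orders.append(remaining)
--     return orders
-- ===== SOURCE B (Python) =====
-- def calculate_orders(balance: int) -> list[int]:
--     count = max(balance // 100, 0)
--     orders = [100] * count
--     remaining = balance - 100 * count
--     if remaining >= 30:
--         orders.append(remaining)
--     return orders
-- ===== Notes on version B (the rewrite author's own statement) =====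
-- stated objective: idiomatic
-- what changed: Computes the chunk count in closed form with floor division and builds the list by replication, instead of A's repeated-subtraction while loop; the remainder is balance - count*chunk, not a modulo, so negatives stay correct.
import Mathlib
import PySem

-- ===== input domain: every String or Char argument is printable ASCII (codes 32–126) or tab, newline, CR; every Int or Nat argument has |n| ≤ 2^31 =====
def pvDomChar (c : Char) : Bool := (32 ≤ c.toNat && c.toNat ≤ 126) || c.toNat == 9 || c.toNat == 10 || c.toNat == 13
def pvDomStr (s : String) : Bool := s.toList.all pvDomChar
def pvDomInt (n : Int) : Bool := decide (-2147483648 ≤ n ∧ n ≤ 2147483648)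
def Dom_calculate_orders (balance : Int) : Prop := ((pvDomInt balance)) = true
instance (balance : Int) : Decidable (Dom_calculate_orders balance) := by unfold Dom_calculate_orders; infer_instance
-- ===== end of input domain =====

-- B replaces the repeated-subtraction loop with a closed-form count/remainder computation.
-- ===== PORT A =====
-- while remaining >= 100: orders.append(100); remaining -= 100
def calcLoopA (orders : List Int) (remaining : Int) : List Int × Int :=
  if h : remaining ≥ 100 then calcLoopA (orders ++ [100]) (remaining - 100)
  else (orders, remaining)
termination_by remaining.toNat
decreasing_by omega

def calculate_orders (balance : Int) : List Int :=
  let p := calcLoopA [] balance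
  if p.2 ≥ 30 then p.1 ++ [p.2] else p.1

-- ===== PORT B =====
def calculate_orders_alt (balance : Int) : List Int :=
  let count : Int := max (PySem.Int.floordiv balance 100) 0
  let orders : List Int := List.replicate count.toNat 100
  let remaining : Int := balance - 100 * count
  if remaining ≥ 30 then orders ++ [remaining] else orders

-- ===== PRECONDITION & SPEC =====
def Spec_calculate_orders (balance : Int) (out : List Int) : Prop := out = calculate_orders_alt balance
instance (balance : Int) (out : List Int) : Decidable (Spec_calculate_orders balance out) := by unfold Spec_calculate_orders; infer_instance

-- ===== CLAIM (what is proved, stated in full; the proofs are below) =====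
def Claim_equal_calculate_orders : Prop := ∀ (balance : Int), Dom_calculate_orders balance → Spec_calculate_orders balance (calculate_orders balance)

-- ===== LEMMAS AND PROOFS =====

-- ===== VERDICT (by name: the statement is the Claim_ definition above) =====
-- Loop characterisation: the while loop appends max(r//100,0) hundreds and leaves r - 100*that.
theorem calcLoopA_eq (orders : List Int) (r : Int) :
    calcLoopA orders r =
      (orders ++ List.replicate (max (PySem.Int.floordiv r 100) 0).toNat 100,
       r - 100 * max (PySem.Int.floordiv r 100) 0) := by
  induction orders, r using calcLoopA.induct with
  | case1 orders r h ih =>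
      rw [calcLoopA, dif_pos h, ih]
      have h100 : PySem.Int.floordiv r 100 = r / 100 :=
        PySem.Int.floordiv_eq_ediv_of_pos (by norm_num)
      have h100' : PySem.Int.floordiv (r - 100) 100 = (r - 100) / 100 :=
        PySem.Int.floordiv_eq_ediv_of_pos (by norm_num)
      have hq : (r - 100) / 100 = r / 100 - 1 := by omega
      have hge : 1 ≤ r / 100 := by omega
      simp only [Prod.mk.injEq]
      constructor
      · rw [List.append_assoc]
        congr 1
        have : (max (r / 100) 0).toNat = ((max (r / 100 - 1) 0).toNat) + 1 := by omega
        rw [h100, h100', hq, this, List.replicate_succ]; rfl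
      · rw [h100, h100', hq]; omega
  | case2 orders r h =>
      rw [calcLoopA, dif_neg h]
      have h100 : PySem.Int.floordiv r 100 = r / 100 :=
        PySem.Int.floordiv_eq_ediv_of_pos (by norm_num)
      have hm : max (PySem.Int.floordiv r 100) 0 = 0 := by rw [h100]; omega
      rw [hm]; simp

theorem calculate_orders_spec : Claim_equal_calculate_orders := by
  intro balance _
  unfold Spec_calculate_orders calculate_orders calculate_orders_alt
  rw [calcLoopA_eq]
  simp
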